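-- pv_equiv track=rewrite | github.com/PachikarriSaiTeja/GFG-Codes | Difficulty: Basic/Reverse a string with spaces intact/reverse-a-string-with-spaces-intact.py | reverseWithSpacesIntact
-- ===== SOURCE A (Python) =====
-- def reverseWithSpacesIntact(s):
--     if len(s) <= 1:
--         return s
--
--     spaces = set()
--     for i in range(len(s)):
--         if s[i] == " ":
--             spaces.add(i)
--
--
--
--     if len(spaces) == 0:
--         return s[::-1]
--
--     str_arr = [c for c in s if c != " "]
--     str_arr=str_arr[::-1]
--     ans = []
--     ind=0
--
--     for i in range(len(s)):
--         if i in spaces: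
--             ans.append(" ")
--         else:
--             ans.append(str_arr[ind])
--             ind+=1
--
--     return ''.join(ans)
-- ===== SOURCE B (Python) =====
-- def reverseWithSpacesIntact(s):
--     a = list(s)
--     i, j = 0, len(a) - 1
--     while i < j:
--         if a[i] == ' ':
--             i += 1
--         elif a[j] == ' ':
--             j -= 1
--         else:
--             a[i], a[j] = a[j], a[i]
--             i += 1
--             j -= 1
--     return ''.join(a)
-- ===== Notes on version B (the rewrite author's own statement) =====
-- stated objective: alternative
-- what changed: B replaces A's staged passes (build a set of space indices, build a filtered-then-reversed character array, then an index-driven merge loop) by a single in-place two-converging-pointers loop that steps over spaces and swaps non-space characters, with no auxiliary set or extracted array; the length<=1 and no-space cases fall out without special-casing.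
import Mathlib
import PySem

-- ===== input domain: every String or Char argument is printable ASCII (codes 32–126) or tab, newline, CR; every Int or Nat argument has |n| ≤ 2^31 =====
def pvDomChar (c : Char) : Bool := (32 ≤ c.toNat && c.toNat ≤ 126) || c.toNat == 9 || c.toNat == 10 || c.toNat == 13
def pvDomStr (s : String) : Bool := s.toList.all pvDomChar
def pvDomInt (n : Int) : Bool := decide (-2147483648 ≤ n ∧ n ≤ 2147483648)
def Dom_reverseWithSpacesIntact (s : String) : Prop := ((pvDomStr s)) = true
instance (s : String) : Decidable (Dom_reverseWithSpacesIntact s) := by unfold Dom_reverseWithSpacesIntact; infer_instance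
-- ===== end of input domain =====

-- B replaces A's staged passes (space-index set, filtered+reversed array, index-driven merge)
-- by a single in-place two converging pointers swap loop; same O(n) cost, a different algorithm.

-- ===== PORT A =====
def reverseWithSpacesIntact (s : String) : String :=
  if PySem.Str.len s ≤ 1 then s
  else
    -- spaces = {i | s[i] == " "}, built by the first loop over range(len(s))
    let spaces : PySem.Set Int :=
      (PySem.List.pyRange 0 (PySem.Str.len s)).foldl
        (fun acc i => if PySem.Str.pyGet? s i = some ' ' then acc.add i else acc)
        (PySem.Set.ofList [])
    if spaces.length = 0 then
      String.ofList ((PySem.List.slice? s.toList none none (-1)).getD [])  -- s[::-1]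
    else
      let str_arr := s.toList.filter (fun c => c ≠ ' ')                    -- [c for c in s if c != " "]
      let str_arr := (PySem.List.slice? str_arr none none (-1)).getD []    -- str_arr[::-1]
      let st := (PySem.List.pyRange 0 (PySem.Str.len s)).foldl
        (fun (st : List Char × Int) i =>
          if spaces.contains i then (st.1 ++ [' '], st.2)
          else (st.1 ++ [PySem.List.pyGetD str_arr st.2 ' '], st.2 + 1))
        (([] : List Char), (0 : Int))
      String.ofList st.1                                                    -- ''.join(ans)

-- ===== PORT B =====
-- the while loop: i, j converge; spaces are stepped over, other characters swapped in place
def twoPtr (a : List Char) (i j : Nat) : List Char :=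
  if h : i < j then
    if a.getD i ' ' = ' ' then twoPtr a (i + 1) j
    else if a.getD j ' ' = ' ' then twoPtr a i (j - 1)
    else twoPtr ((a.set i (a.getD j ' ')).set j (a.getD i ' ')) (i + 1) (j - 1)
  else a
termination_by j - i
decreasing_by all_goals omega

def reverseWithSpacesIntact_alt (s : String) : String :=
  String.ofList (twoPtr s.toList 0 (s.toList.length - 1))

-- ===== PRECONDITION & SPEC =====
def Spec_reverseWithSpacesIntact (s : String) (out : String) : Prop := out = reverseWithSpacesIntact_alt s
instance (s : String) (out : String) : Decidable (Spec_reverseWithSpacesIntact s out) := by unfold Spec_reverseWithSpacesIntact; infer_instance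

-- ===== CLAIM (what is proved, stated in full; the proofs are below) =====
def Claim_equal_reverseWithSpacesIntact : Prop := ∀ (s : String), Dom_reverseWithSpacesIntact s → Spec_reverseWithSpacesIntact s (reverseWithSpacesIntact s)

-- ===== LEMMAS AND PROOFS =====

-- proof-side reference function: spaces kept in place, other characters drawn from the
-- reversed sequence of non-space characters; both ports are proved equal to it
def mergeRev : List Char → List Char → List Char
  | [], _ => []
  | c :: t, rs =>
    if c = ' ' then ' ' :: mergeRev t rs
    else
      match rs with
      | [] => c :: mergeRev t []
      | r :: rs' => r :: mergeRev t rs'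

def spaceRev (m : List Char) : List Char := mergeRev m (m.reverse.filter (fun c => c ≠ ' '))

-- membership in the set built by A's first loop
theorem mem_spaces_fold (s : String) (L : List Int) (acc : PySem.Set Int) (i : Int) :
    i ∈ (L.foldl
      (fun acc i => if PySem.Str.pyGet? s i = some ' ' then acc.add i else acc) acc) ↔
      i ∈ acc ∨ (i ∈ L ∧ PySem.Str.pyGet? s i = some ' ') := by
  induction L generalizing acc with
  | nil => simp
  | cons j L ih =>
    by_cases h : PySem.Str.pyGet? s j = some ' '
    · simp only [List.foldl_cons, if_pos h, ih, PySem.Set.mem_add, List.mem_cons]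
      constructor
      · rintro (h' | ⟨h1, h2⟩)
        · rcases h' with h' | rfl <;> tauto
        · tauto
      · rintro (h' | ⟨h1, h2⟩)
        · tauto
        · rcases h1 with rfl | h1 <;> tauto
    · simp only [List.foldl_cons, if_neg h, ih, List.mem_cons]
      constructor
      · rintro (h' | ⟨h1, h2⟩) <;> tauto
      · rintro (h' | ⟨h1, h2⟩)
        · tauto
        · rcases h1 with rfl | h1
          · exact absurd h2 h
          · tauto

-- mergeRev on an all-non-space string of the same length as the iterator list is that list
theorem mergeRev_all_nonspace : ∀ (xs ys : List Char), (∀ c ∈ xs, c ≠ ' ') →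
    ys.length = xs.length → mergeRev xs ys = ys
  | [], [], _, _ => rfl
  | [], _ :: _, _, h => by simp at h
  | _ :: _, [], _, h => by simp at h
  | c :: t, r :: ys, hns, h => by
    have hc : c ≠ ' ' := hns c (by simp)
    simp only [mergeRev, if_neg hc]
    rw [mergeRev_all_nonspace t ys (fun d hd => hns d (by simp [hd])) (by simpa using h)]

-- spaceRev on a string of length ≤ 1 is the string itself
theorem spaceRev_short (xs : List Char) (h : xs.length ≤ 1) : spaceRev xs = xs := by
  match xs, h with
  | [], _ => rfl
  | [c], _ =>
    by_cases hc : c = ' ' <;> simp [spaceRev, mergeRev, hc]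

-- A's main loop computes mergeRev
theorem loopA (xs rs : List Char) (C : Int → Bool)
    (hC : ∀ (k : Nat) (hk : k < xs.length), (C (k : Int) = true ↔ xs[k] = ' ')) :
    ∀ (t : List Char) (k : Nat), xs.drop k = t →
    ∀ (ans : List Char) (ind : Nat),
      ind + t.countP (fun c => decide (c ≠ ' ')) ≤ rs.length →
      ((PySem.List.pyRange (k : Int) (xs.length : Int)).foldl
        (fun (st : List Char × Int) i =>
          if C i then (st.1 ++ [' '], st.2)
          else (st.1 ++ [PySem.List.pyGetD rs st.2 ' '], st.2 + 1))
        (ans, (ind : Int))) =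
      (ans ++ mergeRev t (rs.drop ind),
        ((ind + t.countP (fun c => decide (c ≠ ' ')) : Nat) : Int)) := by
  intro t
  induction t with
  | nil =>
    intro k hk ans ind hind
    have hlen : xs.length ≤ k := List.drop_eq_nil_iff.mp hk
    rw [PySem.List.pyRange_one_eq_nil (by exact_mod_cast hlen)]
    simp [mergeRev]
  | cons c t ih =>
    intro k hk ans ind hind
    have hklt : k < xs.length := by
      by_contra h
      rw [List.drop_eq_nil_of_le (by omega)] at hk; exact absurd hk (by simp)
    have hxk : xs[k] = c := by
      have := List.drop_eq_getElem_cons (l := xs) hklt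
      rw [hk] at this; exact (List.cons.injEq ..).mp this.symm |>.1
    have hdrop : xs.drop (k + 1) = t := by
      have := List.drop_eq_getElem_cons (l := xs) hklt
      rw [hk] at this; exact (List.cons.injEq ..).mp this.symm |>.2
    rw [PySem.List.pyRange_one_cons (by exact_mod_cast hklt), List.foldl_cons]
    by_cases hc : c = ' '
    · have hCk : C (k : Int) = true := (hC k hklt).mpr (hxk.trans hc)
      have h1 : ((k : Int) + 1) = ((k + 1 : Nat) : Int) := by push_cast; ring
      rw [hCk]
      simp only [if_true, h1]
      rw [ih (k + 1) hdrop (ans ++ [' ']) ind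
        (by simpa [hc] using hind)]
      simp [mergeRev, hc]
    · have hCk : C (k : Int) = false := by
        have := (hC k hklt)
        rw [hxk] at this
        simpa [hc] using (Bool.eq_false_iff.mpr (fun h => hc (this.mp h)))
      have hindlt : ind < rs.length := by
        simp [hc] at hind; omega
      have hdropr : rs.drop ind = rs[ind] :: rs.drop (ind + 1) :=
        List.drop_eq_getElem_cons hindlt
      have hget : PySem.List.pyGetD rs (ind : Int) ' ' = rs[ind] := by
        rw [PySem.List.pyGetD_natCast, List.getD_eq_getElem?_getD, List.getElem?_eq_getElem hindlt]
        rfl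
      have h1 : ((k : Int) + 1) = ((k + 1 : Nat) : Int) := by push_cast; ring
      have h2 : ((ind : Int) + 1) = ((ind + 1 : Nat) : Int) := by push_cast; ring
      rw [hCk]
      simp only [Bool.false_eq_true, if_false, h1, h2, hget]
      rw [ih (k + 1) hdrop (ans ++ [rs[ind]]) (ind + 1)
        (by simp [hc] at hind ⊢; omega)]
      rw [hdropr]
      simp only [mergeRev, if_neg hc, Prod.mk.injEq]
      refine ⟨by simp, ?_⟩
      simp only [List.countP_cons]
      rw [show (decide (c ≠ ' ')) = true from by simp [hc]]
      push_cast
      norm_num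
      ring

-- A computes spaceRev
theorem A_eq_spaceRev (s : String) :
    reverseWithSpacesIntact s = String.ofList (spaceRev s.toList) := by
  unfold reverseWithSpacesIntact
  have hlen : PySem.Str.len s = (s.toList.length : Int) := by simp [pysem]
  by_cases h1 : PySem.Str.len s ≤ 1
  · rw [if_pos h1]
    rw [spaceRev_short s.toList (by rw [hlen] at h1; exact_mod_cast h1)]
    rw [String.ofList_toList]
  · rw [if_neg h1]
    unfold spaceRev
    have hmem : ∀ i : Int, i ∈ ((PySem.List.pyRange 0 (PySem.Str.len s)).foldl
        (fun acc i => if PySem.Str.pyGet? s i = some ' ' then acc.add i else acc)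
        (PySem.Set.ofList [])) ↔
        (i ∈ PySem.List.pyRange 0 (PySem.Str.len s) ∧ PySem.Str.pyGet? s i = some ' ') := by
      intro i
      rw [mem_spaces_fold]
      simp
    by_cases h2 : ((PySem.List.pyRange 0 (PySem.Str.len s)).foldl
        (fun acc i => if PySem.Str.pyGet? s i = some ' ' then acc.add i else acc)
        (PySem.Set.ofList [])).length = 0
    · rw [if_pos h2]
      have hempty := List.length_eq_zero_iff.mp h2
      have hns : ∀ c ∈ s.toList, c ≠ ' ' := by
        intro c hc hsp
        obtain ⟨k, hk, hck⟩ := List.mem_iff_getElem.mp hc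
        have : (k : Int) ∈ ((PySem.List.pyRange 0 (PySem.Str.len s)).foldl
            (fun acc i => if PySem.Str.pyGet? s i = some ' ' then acc.add i else acc)
            (PySem.Set.ofList [])) := by
          rw [hmem]
          constructor
          · rw [PySem.List.mem_pyRange_one, hlen]
            constructor
            · exact_mod_cast Nat.zero_le k
            · exact_mod_cast hk
          · simp [pysem, List.getElem?_eq_getElem hk, hck, hsp]
        rw [hempty] at this
        simp at this
      rw [PySem.List.slice?_none_none_neg_one]
      rw [List.filter_eq_self.mpr (by intro a ha; simpa using hns a (List.mem_reverse.mp ha))]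
      rw [mergeRev_all_nonspace s.toList s.toList.reverse hns (by simp)]
      rfl
    · rw [if_neg h2]
      simp only [PySem.List.slice?_none_none_neg_one, Option.getD_some]
      have hC : ∀ (k : Nat) (hk : k < s.toList.length),
          (((PySem.List.pyRange 0 (PySem.Str.len s)).foldl
            (fun acc i => if PySem.Str.pyGet? s i = some ' ' then acc.add i else acc)
            (PySem.Set.ofList [])).contains (k : Int) = true ↔ s.toList[k] = ' ') := by
        intro k hk
        rw [PySem.Set.contains_iff, hmem, PySem.List.mem_pyRange_one, hlen]
        constructor
        · rintro ⟨-, hg⟩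
          simp [pysem, List.getElem?_eq_getElem hk] at hg
          exact hg
        · intro hg
          refine ⟨⟨by exact_mod_cast Nat.zero_le k, by exact_mod_cast hk⟩, ?_⟩
          simp [pysem, List.getElem?_eq_getElem hk, hg]
      have hmain := loopA s.toList ((s.toList.filter (fun c => c ≠ ' ')).reverse)
        (fun i => ((PySem.List.pyRange 0 (PySem.Str.len s)).foldl
            (fun acc i => if PySem.Str.pyGet? s i = some ' ' then acc.add i else acc)
            (PySem.Set.ofList [])).contains i) hC
        s.toList 0 (by simp) [] 0
        (by simp [List.countP_eq_length_filter])
      simp only [Nat.cast_zero, hlen] at hmain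
      rw [hlen, hmain]
      simp [List.filter_reverse]

-- splitting mergeRev at an append, when the iterator is long enough for the left part
theorem mergeRev_append (x y rs : List Char)
    (h : (x.filter (fun c => c ≠ ' ')).length ≤ rs.length) :
    mergeRev (x ++ y) rs =
      mergeRev x (rs.take (x.filter (fun c => c ≠ ' ')).length) ++
      mergeRev y (rs.drop (x.filter (fun c => c ≠ ' ')).length) := by
  induction x generalizing rs with
  | nil => simp [mergeRev]
  | cons c x ih =>
    by_cases hc : c = ' '
    · simpa [mergeRev, hc] using ih rs (by simpa [hc] using h)
    · simp only [List.filter_cons, if_pos (by simp [hc] : decide (c ≠ ' ') = true),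
        List.length_cons] at h ⊢
      obtain ⟨r, rs', rfl⟩ : ∃ r rs', rs = r :: rs' := by
        cases rs with
        | nil => simp at h
        | cons r rs' => exact ⟨r, rs', rfl⟩
      simp only [List.cons_append, mergeRev, if_neg hc, List.take_succ_cons, List.drop_succ_cons]
      rw [ih rs' (by simpa using h)]

theorem spaceRev_space_cons (t : List Char) : spaceRev (' ' :: t) = ' ' :: spaceRev t := by
  simp [spaceRev, mergeRev]

theorem spaceRev_space_snoc (m : List Char) : spaceRev (m ++ [' ']) = spaceRev m ++ [' '] := by
  unfold spaceRev
  have hrs : (m ++ [' ']).reverse.filter (fun c => c ≠ ' ') =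
      m.reverse.filter (fun c => c ≠ ' ') := by
    simp
  rw [hrs, mergeRev_append m [' '] (m.reverse.filter (fun c => c ≠ ' '))
    (by simp [List.filter_reverse])]
  have hl : (m.filter (fun c => c ≠ ' ')).length =
      (m.reverse.filter (fun c => c ≠ ' ')).length := by simp [List.filter_reverse]
  rw [hl, List.take_length, List.drop_length]
  simp [mergeRev]

theorem spaceRev_swap (x y : Char) (mid : List Char) (hx : x ≠ ' ') (hy : y ≠ ' ') :
    spaceRev (x :: (mid ++ [y])) = y :: (spaceRev mid ++ [x]) := by
  unfold spaceRev
  have hrs : (x :: (mid ++ [y])).reverse.filter (fun c => c ≠ ' ') =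
      y :: (mid.reverse.filter (fun c => c ≠ ' ') ++ [x]) := by
    simp [List.filter_append, hx, hy]
  rw [hrs]
  simp only [mergeRev, if_neg hx]
  rw [mergeRev_append mid [y] (mid.reverse.filter (fun c => c ≠ ' ') ++ [x])
    (by simp [List.filter_reverse])]
  have hl : (mid.filter (fun c => c ≠ ' ')).length =
      (mid.reverse.filter (fun c => c ≠ ' ')).length := by simp [List.filter_reverse]
  rw [hl, List.take_left', List.drop_left']
  · simp [mergeRev, hy]
  · rfl
  · rfl

-- recomposing a list from the three segments the two-pointer invariant talks about
theorem recompose (a : List Char) (i j : Nat) (hi : i ≤ j + 1) :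
    a.take i ++ (a.drop i).take (j + 1 - i) ++ a.drop (j + 1) = a := by
  have h2 : (a.drop i).drop (j + 1 - i) = a.drop (j + 1) := by
    rw [List.drop_drop]; congr 1; omega
  rw [← h2, List.append_assoc, List.take_append_drop, List.take_append_drop]

-- B's two-pointer loop computes spaceRev on the untouched middle segment
theorem twoPtr_eq : ∀ (d : Nat) (a : List Char) (i j : Nat), j - i ≤ d → j < a.length →
    i ≤ j + 1 →
    twoPtr a i j = a.take i ++ spaceRev ((a.drop i).take (j + 1 - i)) ++ a.drop (j + 1) := by
  intro d
  induction d with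
  | zero =>
    intro a i j hd hj hi
    rw [twoPtr, dif_neg (by omega)]
    rw [spaceRev_short _ (by simp; omega), recompose a i j hi]
  | succ d ih =>
    intro a i j hd hj hi
    rw [twoPtr]
    by_cases hij : i < j
    · rw [dif_pos hij]
      have hia : i < a.length := by omega
      have hgi : a.getD i ' ' = a[i] := List.getD_eq_getElem a ' ' hia
      have hgj : a.getD j ' ' = a[j] := List.getD_eq_getElem a ' ' hj
      have hseg : (a.drop i).take (j + 1 - i) = a[i] :: (a.drop (i + 1)).take (j - i) := by
        rw [List.drop_eq_getElem_cons hia, show j + 1 - i = (j - i) + 1 by omega,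
          List.take_succ_cons]
      by_cases hci : a[i] = ' '
      · rw [if_pos (hgi.trans hci)]
        rw [ih a (i + 1) j (by omega) hj (by omega)]
        rw [hseg, hci, spaceRev_space_cons]
        rw [show a.take (i + 1) = a.take i ++ [' '] from by
          rw [List.take_add_one, List.getElem?_eq_getElem hia]; simp [hci]]
        simp
      · rw [if_neg (by rw [hgi]; exact hci)]
        by_cases hcj : a[j] = ' '
        · rw [if_pos (hgj.trans hcj)]
          rw [ih a i (j - 1) (by omega) (by omega) (by omega)]
          have hmid : (a.drop i).take (j + 1 - i) =
              (a.drop i).take (j - 1 + 1 - i) ++ [a[j]] := by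
            rw [show j + 1 - i = (j - 1 + 1 - i) + 1 by omega, List.take_add_one]
            have : (a.drop i)[j - 1 + 1 - i]? = some a[j] := by
              rw [List.getElem?_drop, List.getElem?_eq_getElem (by omega)]
              congr 1
              exact getElem_congr_idx (by omega)
            rw [this]; rfl
          rw [hmid, hcj, spaceRev_space_snoc]
          have hdj : a.drop (j - 1 + 1) = a[j] :: a.drop (j + 1) := by
            rw [show j - 1 + 1 = j by omega, List.drop_eq_getElem_cons hj]
          rw [hdj, hcj]
          simp
        · rw [if_neg (by rw [hgj]; exact hcj)]
          set a' := (a.set i (a.getD j ' ')).set j (a.getD i ' ') with ha'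
          have hlen' : a'.length = a.length := by simp [ha']
          rw [ih a' (i + 1) (j - 1) (by omega) (by rw [hlen']; omega) (by omega)]
          have hti : (a.take i).length = i := by rw [List.length_take]; omega
          have hmidlen : ((a.drop (i + 1)).take (j - (i + 1))).length = j - (i + 1) := by
            rw [List.length_take, List.length_drop]; omega
          have hu : (a.take i ++ [a[j]]).length = i + 1 := by
            rw [List.length_append, hti]; rfl
          have hstep : (a.set i a[j]).take j =
              (a.take i ++ [a[j]]) ++ (a.drop (i + 1)).take (j - (i + 1)) := by
            rw [List.set_eq_take_cons_drop a[j] hia, List.take_append, hti,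
              List.take_take, show min j i = i by omega,
              show j - i = (j - (i + 1)) + 1 by omega, List.take_succ_cons]
            simp
          have hdec : a' = (a.take i ++ [a[j]]) ++
              ((a.drop (i + 1)).take (j - (i + 1)) ++ (a[i] :: a.drop (j + 1))) := by
            rw [ha', hgi, hgj,
              List.set_eq_take_cons_drop a[i] (by rw [List.length_set]; omega),
              List.drop_set_of_lt (by omega), hstep]
            simp
          have hU : a'.take (i + 1) = a.take i ++ [a[j]] := by
            rw [hdec]; exact List.take_left' hu
          have hM : (a'.drop (i + 1)).take (j - 1 + 1 - (i + 1)) =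
              (a.drop (i + 1)).take (j - (i + 1)) := by
            rw [show j - 1 + 1 - (i + 1) = ((a.drop (i + 1)).take (j - (i + 1))).length
              from by rw [hmidlen]; omega]
            rw [hdec, List.drop_left' hu]
            exact List.take_left' rfl
          have hV : a'.drop (j - 1 + 1) = a[i] :: a.drop (j + 1) := by
            rw [show j - 1 + 1 = (i + 1) + (j - (i + 1)) by omega]
            rw [← List.drop_drop, hdec, List.drop_left' hu, List.drop_left' hmidlen]
          have hsegsw : (a.drop i).take (j + 1 - i) =
              a[i] :: ((a.drop (i + 1)).take (j - (i + 1)) ++ [a[j]]) := by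
            rw [hseg]
            congr 1
            rw [show j - i = (j - (i + 1)) + 1 by omega, List.take_add_one]
            have : (a.drop (i + 1))[j - (i + 1)]? = some a[j] := by
              rw [List.getElem?_drop, List.getElem?_eq_getElem (by omega)]
              congr 1
              exact getElem_congr_idx (by omega)
            rw [this]; rfl
          rw [hU, hM, hV, hsegsw, spaceRev_swap a[i] a[j] _ hci hcj]
          simp
    · rw [dif_neg hij]
      rw [spaceRev_short _ (by simp; omega), recompose a i j hi]

-- B computes spaceRev
theorem B_eq_spaceRev (s : String) :
    reverseWithSpacesIntact_alt s = String.ofList (spaceRev s.toList) := by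
  unfold reverseWithSpacesIntact_alt
  by_cases hL : s.toList = []
  · rw [hL, twoPtr, dif_neg (by simp)]
    rfl
  · have hlen : 0 < s.toList.length := List.length_pos_iff.mpr hL
    rw [twoPtr_eq (s.toList.length - 1) s.toList 0 (s.toList.length - 1)
      (by omega) (by omega) (by omega)]
    rw [show s.toList.length - 1 + 1 - 0 = s.toList.length by omega,
      show s.toList.length - 1 + 1 = s.toList.length by omega,
      List.take_zero, List.drop_zero, List.take_length, List.drop_length,
      List.nil_append, List.append_nil]

-- ===== VERDICT (by name: the statement is the Claim_ definition above) =====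
theorem reverseWithSpacesIntact_spec : Claim_equal_reverseWithSpacesIntact := by
  intro s _
  unfold Spec_reverseWithSpacesIntact
  rw [A_eq_spaceRev, B_eq_spaceRev]
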